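-- pv_equiv track=rewrite | github.com/vkehfdl1/ie-capstone | ie_capstone/dataset/parser.py | parse_bug_fixes
-- ===== SOURCE A (Python) =====
-- def parse_bug_fixes(bug_fixes_content: str) -> list[str]:
--     """
--     Parse bug fixes content into list of individual fixes.
--
--     Args:
--         bug_fixes_content: Content from <bug_fixes> tag
--
--     Returns:
--         List of individual fix descriptions
--     """
--     if not bug_fixes_content.strip():
--         return []
--
--     # Split by newlines and filter empty lines
--     lines = [line.strip() for line in bug_fixes_content.split("\n") if line.strip()]
--
--     # Group multi-line fixes (like code blocks)
--     fixes = []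
--     current_fix = []
--
--     for line in lines:
--         # Check if this is a new fix (starts with common patterns)
--         if (
--             line.startswith("Replace")
--             or line.startswith("After")
--             or line.startswith("Insert")
--             or line.startswith("Remove")
--             or line.startswith("Change")
--             or line.startswith("Add")
--         ):
--             if current_fix:
--                 fixes.append("\n".join(current_fix))
--             current_fix = [line]
--         else:
--             current_fix.append(line)
--
--     if current_fix:
--         fixes.append("\n".join(current_fix))
--
--     return fixes if fixes else [bug_fixes_content.strip()]
-- ===== SOURCE B (Python) =====
-- def _is_marker(line):
--     return line.startswith(("Replace", "After", "Insert", "Remove", "Change", "Add"))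
--
--
-- def parse_bug_fixes(bug_fixes_content: str) -> list[str]:
--     if not bug_fixes_content.strip():
--         return []
--
--     lines = [line.strip() for line in bug_fixes_content.split("\n") if line.strip()]
--
--     # Chunk-at-a-time: each group is one line plus the run of following
--     # non-marker lines; no running accumulator is carried across iterations.
--     fixes = []
--     while lines:
--         head, rest = lines[0], lines[1:]
--         k = 0
--         while k < len(rest) and not _is_marker(rest[k]):
--             k += 1
--         fixes.append("\n".join([head] + rest[:k]))
--         lines = rest[k:]
--
--     return fixes if fixes else [bug_fixes_content.strip()]
-- ===== Notes on version B (the rewrite author's own statement) =====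
-- stated objective: alternative
-- what changed: Replaces A's single fold that threads a current_fix accumulator and flushes it at markers (plus a trailing flush) with a chunk-at-a-time outer loop that emits each group whole: take the head line plus the run of following non-marker lines, join, and continue on the remainder.
import Mathlib
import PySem

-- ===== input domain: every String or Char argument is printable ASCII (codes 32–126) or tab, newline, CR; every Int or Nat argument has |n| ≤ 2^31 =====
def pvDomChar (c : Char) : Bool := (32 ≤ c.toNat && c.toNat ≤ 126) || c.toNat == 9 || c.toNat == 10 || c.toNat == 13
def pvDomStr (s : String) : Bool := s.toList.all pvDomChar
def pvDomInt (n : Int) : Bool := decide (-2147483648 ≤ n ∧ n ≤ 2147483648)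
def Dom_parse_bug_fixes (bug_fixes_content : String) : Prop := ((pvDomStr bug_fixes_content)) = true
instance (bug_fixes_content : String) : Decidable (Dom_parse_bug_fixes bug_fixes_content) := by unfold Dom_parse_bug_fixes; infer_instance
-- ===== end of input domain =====

-- B emits each fix chunk-at-a-time (head line plus the run of following non-marker lines)
-- instead of A's fold that threads and flushes a current_fix accumulator; objective: alternative.


-- ===== PORT A =====
-- the six startswith tests, in A's order and left-to-right || as in Python's or-chain
def pvMarkerA (line : String) : Bool :=
  PySem.Str.startswith line "Replace" || PySem.Str.startswith line "After" ||
  PySem.Str.startswith line "Insert" || PySem.Str.startswith line "Remove" ||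
  PySem.Str.startswith line "Change" || PySem.Str.startswith line "Add"

-- A's loop body: state (fixes, current_fix)
def pvStepA (st : List String × List String) (line : String) : List String × List String :=
  if pvMarkerA line then
    (if st.2 ≠ [] then st.1 ++ [PySem.Str.join "\n" st.2] else st.1, [line])
  else
    (st.1, st.2 ++ [line])

def parse_bug_fixes (bug_fixes_content : String) : List String :=
  if PySem.Str.strip bug_fixes_content = "" then []
  else
    let lines := (((PySem.Str.split? bug_fixes_content "\n").getD []).filter
        (fun line => PySem.Str.strip line ≠ "")).map PySem.Str.strip
    let st := lines.foldl pvStepA ([], [])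
    let fixes := if st.2 ≠ [] then st.1 ++ [PySem.Str.join "\n" st.2] else st.1
    if fixes ≠ [] then fixes else [PySem.Str.strip bug_fixes_content]

-- ===== PORT B =====
def pvPrefixes : List String := ["Replace", "After", "Insert", "Remove", "Change", "Add"]

def pvMarkerB (line : String) : Bool := pvPrefixes.any (fun p => PySem.Str.startswith line p)

-- split? is some here since the separator "\n" is a nonempty literal; getD [] totalizes
-- outer while loop of B: one joined chunk per iteration; the inner index scan over
-- `rest` is takeWhile/dropWhile on the non-marker condition
def pvGroupsB : List String → List String
  | [] => []
  | head :: rest =>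
    PySem.Str.join "\n" (head :: rest.takeWhile (fun l => !pvMarkerB l)) ::
      pvGroupsB (rest.dropWhile (fun l => !pvMarkerB l))
termination_by lines => lines.length
decreasing_by
  simp only [List.length_cons]
  exact Nat.lt_succ_of_le (List.length_dropWhile_le _ _)

def parse_bug_fixes_alt (bug_fixes_content : String) : List String :=
  if PySem.Str.strip bug_fixes_content = "" then []
  else
    let lines := (((PySem.Str.split? bug_fixes_content "\n").getD []).filter
        (fun line => PySem.Str.strip line ≠ "")).map PySem.Str.strip
    let fixes := pvGroupsB lines
    if fixes ≠ [] then fixes else [PySem.Str.strip bug_fixes_content]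

-- ===== PRECONDITION & SPEC =====
def Spec_parse_bug_fixes (bug_fixes_content : String) (out : List String) : Prop := out = parse_bug_fixes_alt bug_fixes_content
instance (bug_fixes_content : String) (out : List String) : Decidable (Spec_parse_bug_fixes bug_fixes_content out) := by unfold Spec_parse_bug_fixes; infer_instance

-- ===== CLAIM (what is proved, stated in full; the proofs are below) =====
def Claim_equal_parse_bug_fixes : Prop := ∀ (bug_fixes_content : String), Dom_parse_bug_fixes bug_fixes_content → Spec_parse_bug_fixes bug_fixes_content (parse_bug_fixes bug_fixes_content)

-- ===== LEMMAS AND PROOFS =====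

theorem pvMarkerB_eq (l : String) : pvMarkerB l = pvMarkerA l := by
  simp [pvMarkerA, pvMarkerB, pvPrefixes, Bool.or_assoc]

-- A's fold from a nonempty current chunk, abstracted: grouping as a list of chunks
def pvGaux (cur : List String) : List String → List (List String)
  | [] => [cur]
  | l :: ls => if pvMarkerA l then cur :: pvGaux [l] ls else pvGaux (cur ++ [l]) ls

-- A's fold + final flush computes map join over pvGaux
theorem pvFoldA_eq (ls : List String) : ∀ (fixes cur : List String), cur ≠ [] →
    (let st := ls.foldl pvStepA (fixes, cur)
     if st.2 ≠ [] then st.1 ++ [PySem.Str.join "\n" st.2] else st.1) =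
      fixes ++ (pvGaux cur ls).map (PySem.Str.join "\n") := by
  induction ls with
  | nil => intro fixes cur h; simp [pvGaux, h]
  | cons l ls ih =>
      intro fixes cur h
      simp only [List.foldl_cons]
      by_cases hm : pvMarkerA l
      · have hst : pvStepA (fixes, cur) l = (fixes ++ [PySem.Str.join "\n" cur], [l]) := by
          simp [pvStepA, hm, h]
        rw [hst, ih (fixes ++ [PySem.Str.join "\n" cur]) [l] (by simp), pvGaux]
        simp [hm]
      · have hst : pvStepA (fixes, cur) l = (fixes, cur ++ [l]) := by
          simp [pvStepA, hm]
        rw [hst, ih fixes (cur ++ [l]) (by simp), pvGaux]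
        simp [hm]

theorem pvGroupsB_nil : pvGroupsB [] = [] := by rw [pvGroupsB]

-- pvGaux joined equals B's chunk recursion
theorem pvGaux_eq_groupsB (ls : List String) : ∀ (cur : List String),
    (pvGaux cur ls).map (PySem.Str.join "\n") =
      PySem.Str.join "\n" (cur ++ ls.takeWhile (fun l => !pvMarkerB l)) ::
        pvGroupsB (ls.dropWhile (fun l => !pvMarkerB l)) := by
  induction ls with
  | nil => intro cur; simp [pvGaux, pvGroupsB_nil]
  | cons l ls ih =>
      intro cur
      simp only [pvGaux]
      by_cases hm : pvMarkerA l
      · rw [if_pos hm]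
        simp only [List.map_cons, ih [l]]
        rw [List.takeWhile_cons, List.dropWhile_cons]
        simp [pvMarkerB_eq, hm, pvGroupsB]
      · rw [if_neg hm, ih (cur ++ [l])]
        rw [List.takeWhile_cons, List.dropWhile_cons]
        simp [pvMarkerB_eq, hm]

-- for a nonempty line list, A's fixes equal B's and are nonempty
theorem pv_main (lines : List String) :
    (let st := lines.foldl pvStepA ([], [])
     if st.2 ≠ [] then st.1 ++ [PySem.Str.join "\n" st.2] else st.1) = pvGroupsB lines := by
  cases lines with
  | nil => simp [pvGroupsB]
  | cons l ls =>
      have hstep : pvStepA ([], []) l = ([], [l]) := by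
        simp [pvStepA]
      simp only [List.foldl_cons, hstep]
      rw [pvFoldA_eq ls [] [l] (by simp)]
      rw [pvGaux_eq_groupsB ls [l]]
      simp [pvGroupsB]

-- ===== VERDICT (by name: the statement is the Claim_ definition above) =====
theorem parse_bug_fixes_spec : Claim_equal_parse_bug_fixes := by
  intro content _
  unfold Spec_parse_bug_fixes parse_bug_fixes parse_bug_fixes_alt
  by_cases hs : PySem.Str.strip content = ""
  · simp [hs]
  · simp only [hs, if_false]
    rw [pv_main]
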